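-- pv_equiv track=rewrite | github.com/antoinekllee/parade-contingents | draw_formation.py | create_contingent_ascii
-- ===== SOURCE A (Python) =====
-- import math
--
-- def create_contingent_ascii(total_people, row_size=5):
--     columns = math.ceil(total_people / row_size)
--
--     total_grid_size = row_size * columns
--     missing = total_grid_size - total_people
--
--     seats = [[True for _ in range(columns)] for _ in range(row_size)]
--
--     if missing > 0:
--         col_to_remove = 1
--         seats_removed = 0
--
--         while seats_removed < missing and col_to_remove < columns:
--             # go from bottom row=4 (index=4) up to top row=0
--             for row in range(row_size-1, -1, -1):
--                 if seats_removed >= missing: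
--                     break  # we've removed all we need
--                 # remove this seat (row, col_to_remove)
--                 seats[row][col_to_remove] = False
--                 seats_removed += 1
--             col_to_remove += 1
--
--     result = []
--     for row in range(row_size):
--         row_str = []
--         for col in range(columns):
--             if seats[row][col]:
--                 row_str.append("x")
--             else:
--                 row_str.append(" ")
--         # Join them with a space
--         result.append(" ".join(row_str))
--
--     return "\n".join(result)
-- ===== SOURCE B (Python) =====
-- def create_contingent_ascii(total_people, row_size=5):
--     # ceil(total_people / row_size) computed in integers (exact for |args| <= 2^31)
--     columns = -((-total_people) // row_size)
--     total_grid_size = row_size * columns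
--     missing = total_grid_size - total_people
--     return "\n".join(
--         " ".join(
--             " " if (columns > 1 and col == 1 and row >= row_size - missing) else "x"
--             for col in range(columns)
--         )
--         for row in range(row_size)
--     )
-- ===== Notes on version B (the rewrite author's own statement) =====
-- stated objective: simpler
-- what changed: Replaces the mutable 2D boolean grid plus the bottom-up seat-removal while/for loop with a single closed-form per-cell condition (a cell is blank iff columns > 1, col == 1 and row >= row_size - missing), building the string directly; ceil is computed in integers.
import Mathlib
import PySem

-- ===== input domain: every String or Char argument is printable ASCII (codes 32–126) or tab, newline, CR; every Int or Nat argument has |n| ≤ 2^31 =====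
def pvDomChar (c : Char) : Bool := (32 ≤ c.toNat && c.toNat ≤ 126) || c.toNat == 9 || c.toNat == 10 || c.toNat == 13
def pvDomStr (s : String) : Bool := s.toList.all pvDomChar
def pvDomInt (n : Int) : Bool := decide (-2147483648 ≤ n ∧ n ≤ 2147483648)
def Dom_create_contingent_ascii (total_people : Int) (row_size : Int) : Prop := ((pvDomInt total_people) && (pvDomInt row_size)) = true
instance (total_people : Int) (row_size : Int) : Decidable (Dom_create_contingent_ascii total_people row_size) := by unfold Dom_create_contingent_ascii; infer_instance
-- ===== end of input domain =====

-- B replaces A's mutable 2D boolean grid and bottom-up seat-removal loop with a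
-- closed-form per-cell condition; objective: simpler.

-- ===== PORT A =====

-- seats[row][col] = False  (both indices are nonnegative and in range in every execution of A)
def pvSetFalse (seats : List (List Bool)) (row col : Int) : List (List Bool) :=
  PySem.List.pySetD seats row (PySem.List.pySetD (PySem.List.pyGetD seats row []) col false)

-- seats[row][col] (read; both indices in range in every execution of A)
def pvCell (seats : List (List Bool)) (row col : Int) : Bool :=
  PySem.List.pyGetD (PySem.List.pyGetD seats row []) col false

-- the grid comprehension [[True for _ in range(columns)] for _ in range(row_size)]
def pvGrid0 (row_size columns : Int) : List (List Bool) :=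
  (PySem.List.pyRange 0 row_size 1).map (fun _ => (PySem.List.pyRange 0 columns 1).map (fun _ => true))

-- inner 'for row in range(row_size-1, -1, -1): if seats_removed >= missing: break; …'
def pvInnerA (rows : List Int) (seats : List (List Bool)) (seats_removed missing col : Int) :
    List (List Bool) × Int :=
  match rows with
  | [] => (seats, seats_removed)
  | r :: rest =>
    if seats_removed ≥ missing then (seats, seats_removed)
    else pvInnerA rest (pvSetFalse seats r col) (seats_removed + 1) missing col

-- the while loop; fuel = columns.toNat bounds the iterations (col_to_remove grows by 1 each pass)
def pvWhileA (fuel : Nat) (seats : List (List Bool)) (seats_removed missing col_to_remove columns row_size : Int) :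
    List (List Bool) :=
  match fuel with
  | 0 => seats
  | Nat.succ fuel' =>
    if seats_removed < missing ∧ col_to_remove < columns then
      let p := pvInnerA (PySem.List.pyRange (row_size - 1) (-1) (-1)) seats seats_removed missing col_to_remove
      pvWhileA fuel' p.1 p.2 missing (col_to_remove + 1) columns row_size
    else seats

def create_contingent_ascii (total_people : Int) (row_size : Int) : String :=
  -- math.ceil(total_people / row_size): exact in integers on Dom (|args| ≤ 2^31 < 2^53,
  -- so the correctly rounded float quotient has the same ceiling as the rational one)
  let columns : Int := -(PySem.Int.floordiv (-total_people) row_size)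
  let total_grid_size := row_size * columns
  let missing := total_grid_size - total_people
  let seats : List (List Bool) := pvGrid0 row_size columns
  let seats :=
    if missing > 0 then pvWhileA columns.toNat seats 0 missing 1 columns row_size
    else seats
  let result : List String :=
    (PySem.List.pyRange 0 row_size 1).map (fun row =>
      PySem.Str.join " " ((PySem.List.pyRange 0 columns 1).map (fun col =>
        if pvCell seats row col then "x" else " ")))
  PySem.Str.join "\n" result

-- ===== PORT B =====
def create_contingent_ascii_alt (total_people : Int) (row_size : Int) : String :=
  let columns : Int := -(PySem.Int.floordiv (-total_people) row_size)
  let total_grid_size := row_size * columns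
  let missing := total_grid_size - total_people
  PySem.Str.join "\n" ((PySem.List.pyRange 0 row_size 1).map (fun row =>
    PySem.Str.join " " ((PySem.List.pyRange 0 columns 1).map (fun col =>
      if columns > 1 ∧ col = 1 ∧ row ≥ row_size - missing then " " else "x"))))

-- ===== PRECONDITION & SPEC =====
-- Python raises ZeroDivisionError when row_size = 0; that is the only exclusion.
def Pre_create_contingent_ascii (total_people : Int) (row_size : Int) : Prop := row_size ≠ 0
instance (total_people : Int) (row_size : Int) : Decidable (Pre_create_contingent_ascii total_people row_size) := by unfold Pre_create_contingent_ascii; infer_instance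

def pvWitness_create_contingent_ascii : Int × Int := (12, 5)

def Spec_create_contingent_ascii (total_people : Int) (row_size : Int) (out : String) : Prop := out = create_contingent_ascii_alt total_people row_size
instance (total_people : Int) (row_size : Int) (out : String) : Decidable (Spec_create_contingent_ascii total_people row_size out) := by unfold Spec_create_contingent_ascii; infer_instance

-- ===== CLAIM (what is proved, stated in full; the proofs are below) =====
def Claim_equal_create_contingent_ascii : Prop := ∀ (total_people : Int) (row_size : Int), Dom_create_contingent_ascii total_people row_size → Pre_create_contingent_ascii total_people row_size → Spec_create_contingent_ascii total_people row_size (create_contingent_ascii total_people row_size)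

-- ===== LEMMAS AND PROOFS =====

-- reading a cell after a single seat removal, all indices in range
theorem pv_cell_setFalse (s : List (List Bool)) (N M : Nat)
    (hlen : s.length = N) (hrows : ∀ l ∈ s, l.length = M)
    (r c r' c' : Int) (hr0 : 0 ≤ r) (hr : r < (N : Int)) (hc0 : 0 ≤ c)
    (hr'0 : 0 ≤ r') (hr' : r' < (N : Int)) (hc'0 : 0 ≤ c') (hc' : c' < (M : Int)) :
    pvCell (pvSetFalse s r c) r' c' = if r' = r ∧ c' = c then false else pvCell s r' c' := by
  subst hlen
  have hrN : r.toNat < s.length := by omega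
  have hr'N : r'.toNat < s.length := by omega
  have hrowM : (s[r.toNat]).length = M := hrows _ (List.getElem_mem hrN)
  have hrow'M : (s[r'.toNat]).length = M := hrows _ (List.getElem_mem hr'N)
  unfold pvCell pvSetFalse
  rw [PySem.List.pySetD_of_nonneg _ _ hr0,
      PySem.List.pySetD_of_nonneg _ _ hc0,
      PySem.List.pyGetD_eq_getElem _ _ hr0 (by omega),
      PySem.List.pyGetD_eq_getElem (s.set r.toNat _) _ hr'0 (by simp; omega),
      List.getElem_set]
  by_cases hrr : r' = r
  · have heq : r.toNat = r'.toNat := by omega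
    rw [if_pos heq,
        PySem.List.pyGetD_eq_getElem _ _ hc'0 (by simp [hrowM]; omega),
        PySem.List.pyGetD_eq_getElem _ _ hr'0 (by omega),
        PySem.List.pyGetD_eq_getElem _ _ hc'0 (by rw [hrow'M]; omega),
        List.getElem_set]
    by_cases hcc : c' = c
    · have : c.toNat = c'.toNat := by omega
      simp [hrr, hcc, this]
    · have : ¬ c.toNat = c'.toNat := by omega
      simp [this, hcc, ← hrr]
  · have : ¬ r.toNat = r'.toNat := by omega
    rw [if_neg this, PySem.List.pyGetD_eq_getElem _ _ hr'0 (by omega)]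
    simp [hrr]

theorem pv_shape_setFalse (s : List (List Bool)) (M : Nat) (hrows : ∀ l ∈ s, l.length = M)
    (r c : Int) (hr0 : 0 ≤ r) (hr : r < (s.length : Int)) (hc0 : 0 ≤ c) :
    (pvSetFalse s r c).length = s.length ∧ ∀ l ∈ pvSetFalse s r c, l.length = M := by
  unfold pvSetFalse
  rw [PySem.List.pySetD_of_nonneg _ _ hr0]
  refine ⟨by simp, ?_⟩
  intro l hl
  rcases List.mem_or_eq_of_mem_set hl with h | h
  · exact hrows _ h
  · subst h
    rw [PySem.List.pySetD_of_nonneg _ _ hc0]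
    simp
    exact hrows _ (by
      rw [PySem.List.pyGetD_eq_getElem _ _ hr0 (by omega)]
      exact List.getElem_mem (by omega))

-- full characterisation of the inner removal loop
theorem pvInnerA_spec (rows : List Int) : ∀ (s : List (List Bool)) (k missing c : Int)
    (N M : Nat) (hlen : s.length = N) (hrows : ∀ l ∈ s, l.length = M)
    (hmem : ∀ x ∈ rows, 0 ≤ x ∧ x < (N : Int)) (hc0 : 0 ≤ c) (hc : c < (M : Int)),
    (pvInnerA rows s k missing c).1.length = N ∧
    (∀ l ∈ (pvInnerA rows s k missing c).1, l.length = M) ∧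
    (pvInnerA rows s k missing c).2 = k + ((min (missing - k).toNat rows.length : Nat) : Int) ∧
    (∀ r' c' : Int, 0 ≤ r' → r' < (N : Int) → 0 ≤ c' → c' < (M : Int) →
      pvCell (pvInnerA rows s k missing c).1 r' c' =
        if c' = c ∧ r' ∈ rows.take (missing - k).toNat then false else pvCell s r' c') := by
  induction rows with
  | nil =>
    intro s k missing c N M hlen hrows hmem hc0 hc
    refine ⟨hlen, hrows, by simp [pvInnerA], ?_⟩
    intro r' c' _ _ _ _
    simp [pvInnerA]
  | cons r rest ih =>
    intro s k missing c N M hlen hrows hmem hc0 hc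
    by_cases hk : k ≥ missing
    · have ht : (missing - k).toNat = 0 := by omega
      have hstop : pvInnerA (r :: rest) s k missing c = (s, k) := by
        simp [pvInnerA, hk]
      rw [hstop]
      exact ⟨hlen, hrows, by simp [ht], by intro r' c' _ _ _ _; simp [ht]⟩
    · have hr := hmem r (by simp)
      have hshape := pv_shape_setFalse s M hrows r c hr.1 (by omega) hc0
      obtain ⟨ih1, ih2, ih3, ih4⟩ := ih (pvSetFalse s r c) (k + 1) missing c N M
        (by rw [hshape.1, hlen]) hshape.2 (fun x hx => hmem x (by simp [hx])) hc0 hc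
      have hstep : pvInnerA (r :: rest) s k missing c =
          pvInnerA rest (pvSetFalse s r c) (k + 1) missing c := by
        simp [pvInnerA, hk]
      rw [hstep]
      refine ⟨ih1, ih2, ?_, ?_⟩
      · rw [ih3]; simp only [List.length_cons]; omega
      · intro r' c' hr'0 hr' hc'0 hc'
        rw [ih4 r' c' hr'0 hr' hc'0 hc',
            pv_cell_setFalse s N M hlen hrows r c r' c' hr.1 hr.2 hc0 hr'0 hr' hc'0 hc']
        have htake : (missing - k).toNat = (missing - (k+1)).toNat + 1 := by omega
        rw [htake, List.take_succ_cons]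
        by_cases hcc : c' = c <;> by_cases hrr : r' = r <;>
          by_cases hmm : r' ∈ rest.take (missing - (k+1)).toNat <;>
          simp [hcc, hrr, hmm]

theorem pv_grid0_len (r m : Int) : (pvGrid0 r m).length = r.toNat := by
  simp [pvGrid0, PySem.List.length_pyRange_one]

theorem pv_grid0_rows (r m : Int) : ∀ l ∈ pvGrid0 r m, l.length = m.toNat := by
  intro l hl
  simp [pvGrid0] at hl
  obtain ⟨x, hx, rfl⟩ := hl
  simp [PySem.List.length_pyRange_one]

theorem pv_grid0_cell (r m row col : Int) (h0 : 0 ≤ row) (h1 : row < r)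
    (h2 : 0 ≤ col) (h3 : col < m) : pvCell (pvGrid0 r m) row col = true := by
  unfold pvCell
  rw [PySem.List.pyGetD_eq_getElem _ _ h0 (by rw [pv_grid0_len]; omega)]
  have : (pvGrid0 r m)[row.toNat]'(by rw [pv_grid0_len]; omega) =
      (PySem.List.pyRange 0 m 1).map (fun _ => true) := by
    simp [pvGrid0]
  rw [this, PySem.List.pyGetD_eq_getElem _ _ h2
      (by simp [PySem.List.length_pyRange_one]; omega)]
  simp

theorem pv_mem_take_countdown (r : Int) (t : Nat) (ht : (t : Int) ≤ r) (x : Int) :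
    x ∈ (PySem.List.pyRange (r - 1) (-1) (-1)).take t ↔ r - t ≤ x ∧ x ≤ r - 1 := by
  rw [PySem.List.pyRange_neg_one, ← List.map_take, List.take_range]
  have : (r - 1 - (-1)).toNat = r.toNat := by omega
  rw [this]
  simp only [List.mem_map, List.mem_range]
  constructor
  · rintro ⟨k, hk, rfl⟩; omega
  · intro hx; exact ⟨(r - 1 - x).toNat, by omega, by omega⟩

theorem pv_countdown_len (r : Int) : (PySem.List.pyRange (r - 1) (-1) (-1)).length = r.toNat := by
  rw [PySem.List.pyRange_neg_one]
  simp

theorem pv_mem_countdown (r x : Int) (hx : x ∈ PySem.List.pyRange (r - 1) (-1) (-1)) :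
    0 ≤ x ∧ x < r := by
  rw [PySem.List.pyRange_neg_one] at hx
  simp only [List.mem_map, List.mem_range] at hx
  obtain ⟨k, hk, rfl⟩ := hx
  omega

-- missing = (-total) mod row_size: nonnegative and below row_size
theorem pv_missing_mod (t r : Int) (hr : 0 < r) :
    0 ≤ r * (-(PySem.Int.floordiv (-t) r)) - t ∧ r * (-(PySem.Int.floordiv (-t) r)) - t < r := by
  have h := PySem.Int.floordiv_mul_add_mod (-t) r
  have h0 := PySem.Int.mod_nonneg (-t) hr
  have h1 := PySem.Int.mod_lt (-t) hr
  constructor <;> nlinarith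

-- the seats array that A ends up reading, characterised cell-by-cell
theorem pv_seats_final (t r : Int) (hr : 0 < r)
    (row col : Int) (h0 : 0 ≤ row) (h1 : row < r) (h2 : 0 ≤ col)
    (h3 : col < -(PySem.Int.floordiv (-t) r)) :
    pvCell (if r * (-(PySem.Int.floordiv (-t) r)) - t > 0 then
        pvWhileA (-(PySem.Int.floordiv (-t) r)).toNat (pvGrid0 r (-(PySem.Int.floordiv (-t) r)))
          0 (r * (-(PySem.Int.floordiv (-t) r)) - t) 1 (-(PySem.Int.floordiv (-t) r)) r
      else pvGrid0 r (-(PySem.Int.floordiv (-t) r))) row col =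
    if (-(PySem.Int.floordiv (-t) r)) > 1 ∧ col = 1 ∧ row ≥ r - (r * (-(PySem.Int.floordiv (-t) r)) - t)
      then false else true := by
  obtain ⟨hmiss0, hmissr⟩ := pv_missing_mod t r hr
  set m := -(PySem.Int.floordiv (-t) r) with hm
  set miss := r * m - t with hmissdef
  by_cases hpos : miss > 0
  · rw [if_pos hpos]
    by_cases hm1 : 1 < m
    · -- the while loop runs exactly one iteration and removes 'miss' seats of column 1
      have hfuel : m.toNat = (m.toNat - 2) + 1 + 1 := by omega
      rw [hfuel]
      rw [pvWhileA, if_pos ⟨hpos, hm1⟩]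
      dsimp only
      obtain ⟨hN, hM, hsnd, hcell⟩ := pvInnerA_spec (PySem.List.pyRange (r - 1) (-1) (-1))
        (pvGrid0 r m) 0 miss 1 r.toNat m.toNat (pv_grid0_len r m) (pv_grid0_rows r m)
        (fun x hx => by have := pv_mem_countdown r x hx; omega) (by omega) (by omega)
      have hsnd' : (pvInnerA (PySem.List.pyRange (r - 1) (-1) (-1)) (pvGrid0 r m) 0 miss 1).2 = miss := by
        rw [hsnd, pv_countdown_len]
        omega
      have hdone : ∀ fuel s, pvWhileA fuel s miss miss (1+1) m r = s := by
        intro fuel s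
        cases fuel with
        | zero => rfl
        | succ n => rw [pvWhileA, if_neg (by omega)]
      rw [hsnd', hdone]
      rw [hcell row col h0 (by omega) h2 (by omega)]
      have htak := pv_mem_take_countdown r (miss - 0).toNat (by omega) row
      rw [pv_grid0_cell r m row col h0 h1 h2 h3]
      by_cases hcol : col = 1 <;> by_cases hrow : r - miss ≤ row
      · rw [if_pos ⟨hcol, htak.mpr ⟨by omega, by omega⟩⟩, if_pos ⟨hm1, hcol, by omega⟩]
      · rw [if_neg (fun hcon => by have := htak.mp hcon.2; omega), if_neg (by omega)]
      · rw [if_neg (by simp [hcol]), if_neg (by simp [hcol])]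
      · rw [if_neg (by simp [hcol]), if_neg (by simp [hcol])]
    · -- columns ≤ 1: the while condition is false from the start
      have hseats : pvWhileA m.toNat (pvGrid0 r m) 0 miss 1 m r = pvGrid0 r m := by
        cases h : m.toNat with
        | zero => rfl
        | succ n => rw [pvWhileA, if_neg (by omega)]
      rw [hseats, pv_grid0_cell r m row col h0 h1 h2 h3, if_neg (by omega)]
  · rw [if_neg hpos, pv_grid0_cell r m row col h0 h1 h2 h3, if_neg (by omega)]

-- ===== VERDICT (by name: the statement is the Claim_ definition above) =====
theorem create_contingent_ascii_spec : Claim_equal_create_contingent_ascii := by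
  intro t r _ hpre
  unfold Spec_create_contingent_ascii create_contingent_ascii create_contingent_ascii_alt
  dsimp only
  by_cases hr : r ≤ 0
  · rw [PySem.List.pyRange_one_eq_nil hr]
    rfl
  · push_neg at hr
    congr 1
    apply List.map_congr_left
    intro row hrow
    rw [PySem.List.mem_pyRange_one] at hrow
    congr 1
    apply List.map_congr_left
    intro col hcol
    rw [PySem.List.mem_pyRange_one] at hcol
    rw [pv_seats_final t r hr row col (by omega) hrow.2 (by omega) hcol.2]
    by_cases h : (-PySem.Int.floordiv (-t) r) > 1 ∧ col = 1 ∧ row ≥ r - (r * (-(PySem.Int.floordiv (-t) r)) - t)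
    · rw [if_pos h, if_pos h]
      rfl
    · rw [if_neg h, if_neg h]
      rfl
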